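-- pv_equiv track=rewrite | github.com/barth010may/AdventOfCode | AdventOfCode2023/Day7/part1.py | x_pair
-- ===== SOURCE A (Python) =====
-- def x_pair(cards, x):
--     counter = 0
--     list = []
--     for card in cards:
--         if cards.count(card) < 2 or card in list:
--             continue
--         else:
--             counter += 1
--             list.append(card)
--
--     if counter == x:
--         return True
--     else:
--         return False
-- ===== SOURCE B (Python) =====
-- def x_pair(cards, x):
--     counts = {}
--     for card in cards:
--         counts[card] = counts.get(card, 0) + 1
--     repeated = sum(1 for v in counts.values() if v >= 2)
--     return repeated == x
-- ===== Notes on version B (the rewrite author's own statement) =====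
-- stated objective: faster
-- what changed: B builds a character-frequency dictionary in one pass and counts values >= 2, instead of A's per-character cards.count scan plus a seen-list membership test.
import Mathlib
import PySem

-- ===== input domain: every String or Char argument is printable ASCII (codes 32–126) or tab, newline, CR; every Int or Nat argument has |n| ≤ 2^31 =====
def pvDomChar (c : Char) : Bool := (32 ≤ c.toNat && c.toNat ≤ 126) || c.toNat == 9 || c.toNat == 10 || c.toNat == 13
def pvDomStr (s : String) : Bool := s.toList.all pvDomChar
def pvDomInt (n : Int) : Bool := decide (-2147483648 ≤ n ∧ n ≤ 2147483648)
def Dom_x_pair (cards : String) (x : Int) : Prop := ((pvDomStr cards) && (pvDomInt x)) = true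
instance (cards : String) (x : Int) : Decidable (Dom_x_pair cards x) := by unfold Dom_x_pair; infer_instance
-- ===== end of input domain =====

-- B replaces A's per-character cards.count scan + seen-list with a one-pass frequency
-- dictionary whose values ≥ 2 are counted (faster in a timing run: O(n) vs O(n^2)).

-- ===== PORT A =====
-- cards.count(card) for a single character equals the List.count of that character (exact).
def x_pair (cards : String) (x : Int) : Bool :=
  let st := cards.toList.foldl
    (fun (s : Int × List Char) card =>
      if ((cards.toList.count card : Int) < 2) || s.2.contains card then s
      else (s.1 + 1, s.2 ++ [card]))
    (0, [])
  if st.1 = x then true else false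

-- ===== PORT B =====
def x_pair_alt (cards : String) (x : Int) : Bool :=
  let counts : PySem.Dict Char Int :=
    cards.toList.foldl (fun d card => d.insert card (d.getD card 0 + 1)) PySem.Dict.empty
  let repeated : Int := counts.values.foldl (fun acc v => if 2 ≤ v then acc + 1 else acc) 0
  repeated == x

-- ===== PRECONDITION & SPEC =====
def Spec_x_pair (cards : String) (x : Int) (out : Bool) : Prop := out = x_pair_alt cards x
instance (cards : String) (x : Int) (out : Bool) : Decidable (Spec_x_pair cards x out) := by unfold Spec_x_pair; infer_instance

-- ===== CLAIM (what is proved, stated in full; the proofs are below) =====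
def Claim_equal_x_pair : Prop := ∀ (cards : String) (x : Int), Dom_x_pair cards x → Spec_x_pair cards x (x_pair cards x)

-- ===== LEMMAS AND PROOFS =====

-- A's loop: counter counts, and the seen-list collects, the distinct repeated characters.
lemma loopA_eq (L : List Char) (t : List Char) (k : Int) (seen : List Char) :
    t.foldl
      (fun (s : Int × List Char) card =>
        if ((L.count card : Int) < 2) || s.2.contains card then s
        else (s.1 + 1, s.2 ++ [card]))
      (k, seen)
    = (k + ((PySem.Set.update seen (t.filter (fun c => decide (2 ≤ (L.count c : Int))))).length : Int)
         - (seen.length : Int),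
       PySem.Set.update seen (t.filter (fun c => decide (2 ≤ (L.count c : Int))))) := by
  induction t generalizing k seen with
  | nil => simp [PySem.Set.update]
  | cons c t ih =>
    by_cases h1 : (2 : Int) ≤ (L.count c : Int)
    · by_cases h2 : c ∈ seen
      · have hfc : (c :: t).filter (fun c => decide (2 ≤ (L.count c : Int)))
            = c :: t.filter (fun c => decide (2 ≤ (L.count c : Int))) := by
          simp only [List.filter_cons, decide_eq_true_eq, if_pos h1]
        have hadd : PySem.Set.add seen c = seen := by
          simp [PySem.Set.add, PySem.Set.contains, h2]
        simp only [List.foldl_cons, hfc, PySem.Set.update, hadd]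
        have hcond : ((decide ((L.count c : Int) < 2)) || seen.contains c) = true := by
          simp [h2]
        rw [hcond]
        simpa [PySem.Set.update] using ih k seen
      · have hfc : (c :: t).filter (fun c => decide (2 ≤ (L.count c : Int)))
            = c :: t.filter (fun c => decide (2 ≤ (L.count c : Int))) := by
          simp only [List.filter_cons, decide_eq_true_eq, if_pos h1]
        have hadd : PySem.Set.add seen c = seen ++ [c] := by
          simp [PySem.Set.add, PySem.Set.contains, h2]
        have hcond : ((decide ((L.count c : Int) < 2)) || seen.contains c) = false := by
          simp only [Bool.or_eq_false_iff, decide_eq_false_iff_not, not_lt,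
            List.contains_eq_mem, decide_eq_false_iff_not]
          exact ⟨h1, h2⟩
        simp only [List.foldl_cons, hfc, PySem.Set.update, hadd, hcond, Bool.false_eq_true,
          if_false]
        have := ih (k + 1) (seen ++ [c])
        simp only [PySem.Set.update] at this
        rw [this]
        simp only [Prod.mk.injEq]
        refine ⟨by simp only [List.length_append, List.length_cons, List.length_nil]; push_cast; ring, trivial⟩
    · have hfc : (c :: t).filter (fun c => decide (2 ≤ (L.count c : Int)))
          = t.filter (fun c => decide (2 ≤ (L.count c : Int))) := by
        simp only [List.filter_cons, decide_eq_true_eq, if_neg h1]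
      have hcond : ((decide ((L.count c : Int) < 2)) || seen.contains c) = true := by
        simp only [Bool.or_eq_true_iff, decide_eq_true_eq]
        exact Or.inl (not_le.mp h1)
      simp only [List.foldl_cons, hcond, if_true, hfc]
      exact ih k seen

-- dedup-then-filter commutes (by value), for any accumulated set.
lemma update_filter_comm (q : Char → Bool) (l : List Char) :
    ∀ s : List Char, (PySem.Set.update s l).filter q = PySem.Set.update (s.filter q) (l.filter q) := by
  induction l with
  | nil => intro s; simp [PySem.Set.update]
  | cons c l ih =>
    intro s
    by_cases hq : q c
    · have step : (PySem.Set.add s c).filter q = PySem.Set.add (s.filter q) c := by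
        by_cases hc : c ∈ s
        · have : c ∈ s.filter q := List.mem_filter.mpr ⟨hc, hq⟩
          simp [PySem.Set.add, PySem.Set.contains, hc, this]
        · have : c ∉ s.filter q := fun h => hc (List.mem_filter.mp h).1
          simp [PySem.Set.add, PySem.Set.contains, hc, this, List.filter_append, hq]
      simp only [PySem.Set.update, List.foldl_cons, List.filter_cons, hq]
      calc (l.foldl PySem.Set.add (PySem.Set.add s c)).filter q
          = PySem.Set.update ((PySem.Set.add s c).filter q) (l.filter q) := by
            simpa [PySem.Set.update] using ih (PySem.Set.add s c)
        _ = _ := by rw [step]; rfl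
    · have step : (PySem.Set.add s c).filter q = s.filter q := by
        by_cases hc : c ∈ s
        · simp [PySem.Set.add, PySem.Set.contains, hc]
        · simp [PySem.Set.add, PySem.Set.contains, hc, List.filter_append, hq]
      simp only [PySem.Set.update, List.foldl_cons, List.filter_cons, hq]
      calc (l.foldl PySem.Set.add (PySem.Set.add s c)).filter q
          = PySem.Set.update ((PySem.Set.add s c).filter q) (l.filter q) := by
            simpa [PySem.Set.update] using ih (PySem.Set.add s c)
        _ = _ := by rw [step]; rfl

lemma ofList_filter (q : Char → Bool) (l : List Char) :
    PySem.Set.ofList (l.filter q) = (PySem.Set.ofList l).filter q := by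
  have := update_filter_comm q l []
  simpa [PySem.Set.ofList_eq_foldl, PySem.Set.update] using this.symm

-- B's repeated-counter equals the same distinct-repeated count.
lemma altCount (L : List Char) :
    (L.foldl (fun d card => d.insert card (d.getD card 0 + 1)) (PySem.Dict.empty : PySem.Dict Char Int)).values.foldl
      (fun acc v => if 2 ≤ v then acc + 1 else acc) (0 : Int)
    = ((PySem.Set.ofList (L.filter (fun c => decide (2 ≤ (L.count c : Int))))).length : Int) := by
  rw [show (L.foldl (fun d card => d.insert card (d.getD card 0 + 1)) (PySem.Dict.empty : PySem.Dict Char Int)) = PySem.Dict.counter L from rfl]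
  rw [PySem.List.foldl_ite_add_one]
  have hv : (PySem.Dict.counter L).values
      = (PySem.Set.ofList L).map (fun k => ((L.count k : Int))) := by
    simp only [PySem.Dict.values, PySem.Dict.items_counter, List.map_map]
    rfl
  rw [hv, List.countP_map, ofList_filter, List.countP_eq_length_filter]
  simp only [zero_add, Nat.cast_inj]
  rfl

lemma main_eq (L : List Char) (x : Int) :
    (if (L.foldl
          (fun (s : Int × List Char) card =>
            if ((L.count card : Int) < 2) || s.2.contains card then s
            else (s.1 + 1, s.2 ++ [card]))
          ((0 : Int), ([] : List Char))).1 = x then true else false)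
    = (((L.foldl (fun d card => d.insert card (d.getD card 0 + 1))
          (PySem.Dict.empty : PySem.Dict Char Int)).values.foldl
            (fun acc v => if 2 ≤ v then acc + 1 else acc) (0 : Int)) == x) := by
  rw [loopA_eq L L 0 [], altCount L]
  rw [show PySem.Set.update ([] : List Char)
        (L.filter (fun c => decide (2 ≤ (L.count c : Int))))
      = PySem.Set.ofList (L.filter (fun c => decide (2 ≤ (L.count c : Int)))) from rfl]
  generalize ((PySem.Set.ofList (L.filter (fun c => decide (2 ≤ (L.count c : Int))))).length : Int) = a
  by_cases h : a = x
  · simp [h]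
  · simp [h]

-- ===== VERDICT (by name: the statement is the Claim_ definition above) =====
-- ===== VERDICT (by name: the statement is the Claim_ definition above) =====
theorem x_pair_spec : Claim_equal_x_pair := by
  intro cards x _
  show x_pair cards x = x_pair_alt cards x
  exact main_eq cards.toList x
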